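-- pv_equiv track=rewrite | github.com/Remilie25/projets | Tipe_code_RSA.py | premier_n_bits
-- ===== SOURCE A (Python) =====
-- def premier_n_bits(x,n): #ne sert pas -> faire direct par x//2**n
--     '''renvoie les n premiers bits de x avec le poids faible devant'''
--     xf=0
--     y=1
--     z=x
--     for i in range(n):
--         xf+=y*(z%2)
--         z//=2
--         y*=2
--     return xf
-- ===== SOURCE B (Python) =====
-- def premier_n_bits(x, n):
--     if n <= 0:
--         return 0
--     return x % (1 << n)
-- ===== Notes on version B (the rewrite author's own statement) =====
-- stated objective: faster
-- what changed: replaces the n-step bit-by-bit accumulation loop with a single modulo by 1<<n (x mod 2^n in one bignum operation)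
import Mathlib
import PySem

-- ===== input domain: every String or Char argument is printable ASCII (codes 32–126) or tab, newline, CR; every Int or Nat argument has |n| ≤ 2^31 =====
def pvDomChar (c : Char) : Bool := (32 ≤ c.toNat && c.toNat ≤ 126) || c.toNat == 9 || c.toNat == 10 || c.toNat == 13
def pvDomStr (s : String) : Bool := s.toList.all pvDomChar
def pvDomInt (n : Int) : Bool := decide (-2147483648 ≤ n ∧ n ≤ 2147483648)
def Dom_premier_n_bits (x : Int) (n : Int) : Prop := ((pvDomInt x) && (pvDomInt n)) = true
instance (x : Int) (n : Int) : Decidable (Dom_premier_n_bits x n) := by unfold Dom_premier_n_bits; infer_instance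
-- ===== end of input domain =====

-- B replaces A's n-step bit accumulation loop with a single modulo by 2^n (objective: faster).

-- ===== PORT A =====
-- state (xf, y, z); per iteration: xf += y*(z%2); z //= 2; y *= 2
def premier_n_bits (x : Int) (n : Int) : Int :=
  ((PySem.List.pyRange 0 n 1).foldl
    (fun (s : Int × Int × Int) _ =>
      (s.1 + s.2.1 * PySem.Int.mod s.2.2 2, s.2.1 * 2, PySem.Int.floordiv s.2.2 2))
    (0, 1, x)).1

-- ===== PORT B =====
def premier_n_bits_alt (x : Int) (n : Int) : Int :=
  if n ≤ 0 then 0 else PySem.Int.mod x (2 ^ n.toNat)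

-- ===== PRECONDITION & SPEC =====
def Spec_premier_n_bits (x : Int) (n : Int) (out : Int) : Prop := out = premier_n_bits_alt x n
instance (x : Int) (n : Int) (out : Int) : Decidable (Spec_premier_n_bits x n out) := by unfold Spec_premier_n_bits; infer_instance

-- ===== CLAIM (what is proved, stated in full; the proofs are below) =====
def Claim_equal_premier_n_bits : Prop := ∀ (x : Int) (n : Int), Dom_premier_n_bits x n → Spec_premier_n_bits x n (premier_n_bits x n)

-- ===== LEMMAS AND PROOFS =====

-- loop invariant: after k iterations the state is (x % 2^k, 2^k, x / 2^k)
theorem pv_loop_inv (x : Int) (k : Nat) :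
    ((PySem.List.pyRange 0 (k : Int) 1).foldl
      (fun (s : Int × Int × Int) _ =>
        (s.1 + s.2.1 * PySem.Int.mod s.2.2 2, s.2.1 * 2, PySem.Int.floordiv s.2.2 2))
      (0, 1, x))
    = (x % 2 ^ k, 2 ^ k, x / 2 ^ k) := by
  induction k with
  | zero => simp [PySem.List.pyRange_one_eq_nil]
  | succ k ih =>
    have hsplit : PySem.List.pyRange 0 ((k + 1 : Nat) : Int) 1
        = PySem.List.pyRange 0 (k : Int) 1 ++ [(k : Int)] := by
      have := PySem.List.pyRange_one_succ_right (a := 0) (b := (k : Int)) (by positivity)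
      push_cast
      push_cast at this
      exact this
    rw [hsplit, List.foldl_append, ih]
    simp only [List.foldl_cons, List.foldl_nil]
    have h2 : (0 : Int) < 2 := by norm_num
    rw [PySem.Int.mod_eq_emod_of_pos h2, PySem.Int.floordiv_eq_ediv_of_pos h2]
    have hdd : x / 2 ^ k / 2 = x / 2 ^ (k + 1) := by
      rw [Int.ediv_ediv_of_nonneg (by positivity)]
      ring_nf
    have h1 : x % 2 ^ k = x - 2 ^ k * (x / 2 ^ k) := Int.emod_def x (2 ^ k)
    have h2' : x / 2 ^ k % 2 = x / 2 ^ k - 2 * (x / 2 ^ k / 2) := Int.emod_def _ 2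
    have h3 : x % 2 ^ (k + 1) = x - 2 ^ (k + 1) * (x / 2 ^ (k + 1)) := Int.emod_def x _
    refine Prod.ext ?_ (Prod.ext ?_ ?_)
    · show x % 2 ^ k + 2 ^ k * (x / 2 ^ k % 2) = x % 2 ^ (k + 1)
      rw [h1, h2', h3, hdd]
      ring
    · show (2 : Int) ^ k * 2 = 2 ^ (k + 1)
      ring
    · exact hdd

theorem pv_emod_eq_alt (x : Int) (n : Int) (hn : ¬ n ≤ 0) :
    x % 2 ^ n.toNat = premier_n_bits_alt x n := by
  unfold premier_n_bits_alt
  rw [if_neg hn, PySem.Int.mod_eq_emod_of_pos (by positivity)]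

-- ===== VERDICT (by name: the statement is the Claim_ definition above) =====
theorem premier_n_bits_spec : Claim_equal_premier_n_bits := by
  intro x n _
  show premier_n_bits x n = premier_n_bits_alt x n
  unfold premier_n_bits
  by_cases hn : n ≤ 0
  · rw [PySem.List.pyRange_one_eq_nil hn]
    simp [premier_n_bits_alt, hn]
  · have hcast : n = ((n.toNat : Nat) : Int) := by omega
    rw [hcast, pv_loop_inv]
    show x % 2 ^ n.toNat = premier_n_bits_alt x ((n.toNat : Nat) : Int)
    rw [← hcast]
    exact pv_emod_eq_alt x n hn
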